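-- pv_equiv track=rewrite | github.com/Benjamin-Currie/advent-of-code | 2024/day_09/aoc202409.py | part_one
-- ===== SOURCE A (Python) =====
-- def part_one(data):
--     """Solve part 1."""
--     all_digits = [x for x in data if x != "."]
--     moves_to_make = len(all_digits)
--     total = 0
--     # Loop through each file block and multiply that by the current index
--     for i, char in enumerate(data):
--         if i == moves_to_make:
--             break
--         multiply_by = char
--         # If the character is an X then pop the last number from the file data and use that
--         if multiply_by == ".":
--             multiply_by = all_digits.pop()
--         total += i * int(multiply_by)
--     return total
-- ===== SOURCE B (Python) =====
-- def part_one(data):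
--     """Solve part 1."""
--     moves_to_make = sum(1 for x in data if x != ".")
--     right = len(data) - 1
--     total = 0
--     for left in range(moves_to_make):
--         value = data[left]
--         if value == ".":
--             while data[right] == ".":
--                 right -= 1
--             value = data[right]
--             right -= 1
--         total += left * int(value)
--     return total
-- ===== Notes on version B (the rewrite author's own statement) =====
-- stated objective: idiomatic
-- what changed: B drops A's materialised all_digits filter list and its pop() stack; it keeps a single right cursor walking leftward over data, skipping dots, to pull the next file block from the end, with the block count computed once.
import Mathlib
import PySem

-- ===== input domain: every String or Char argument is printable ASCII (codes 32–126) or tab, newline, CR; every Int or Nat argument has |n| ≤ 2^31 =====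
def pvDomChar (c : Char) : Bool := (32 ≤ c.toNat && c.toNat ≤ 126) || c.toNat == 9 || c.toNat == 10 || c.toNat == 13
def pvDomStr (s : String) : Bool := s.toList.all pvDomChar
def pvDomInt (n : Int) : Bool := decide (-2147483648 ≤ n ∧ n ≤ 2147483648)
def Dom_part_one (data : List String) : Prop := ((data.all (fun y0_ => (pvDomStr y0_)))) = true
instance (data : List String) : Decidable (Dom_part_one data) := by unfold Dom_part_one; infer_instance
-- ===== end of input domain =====

-- B replaces A's materialised filter list + pop() stack by a single right cursor into data
-- that skips '.' leftward to pull the next file block from the end (same O(n) time, no extra list).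

-- int(s); the default 0 is never reached under Pre_part_one (int(s) succeeds there)
def pvIntOf (s : String) : Int := (PySem.Int.ofStr? s).getD 0

-- ===== PORT A =====
-- the for-loop of A over `enumerate(data)` with its `break` at i == moves_to_make;
-- state: remaining list, index i, the all_digits list being popped, running total
def partOneLoopA (rest : List String) (i : Nat) (digits : List String) (total : Int) (m : Nat) : Int :=
  match rest with
  | [] => total
  | c :: rest' =>
    if i = m then total
    else
      if c = "." then
        match PySem.List.pop? digits with
        | some (v, digits') => partOneLoopA rest' (i + 1) digits' (total + (i : Int) * pvIntOf v) m
        | none => total  -- Python would raise IndexError on pop of []; unreachable (pops ≤ |all_digits|)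
      else
        partOneLoopA rest' (i + 1) digits (total + (i : Int) * pvIntOf c) m

def part_one (data : List String) : Int :=
  let all_digits := data.filter (fun x => x ≠ ".")
  let moves_to_make := all_digits.length
  partOneLoopA data 0 all_digits 0 moves_to_make

-- ===== PORT B =====
-- the `while data[right] == ".": right -= 1` loop of B (right stays ≥ 0 and < len in every
-- reachable call, so Nat with structural decrement is exact; the out-of-range default is never read)
def pvSkipDots (data : List String) (r : Nat) : Nat :=
  if data[r]? = some "." then
    match r with
    | 0 => 0
    | r' + 1 => pvSkipDots data r'
  else r
termination_by r

-- the `for left in range(moves_to_make)` loop of B; data[left] is in range since left < n ≤ len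
def partOneLoopB (data : List String) (n : Nat) (left : Nat) (right : Nat) (total : Int) : Int :=
  if _h : left < n then
    let value := (data[left]?).getD "."
    if value = "." then
      let j := pvSkipDots data right
      partOneLoopB data n (left + 1) (j - 1) (total + (left : Int) * pvIntOf ((data[j]?).getD "."))
    else
      partOneLoopB data n (left + 1) right (total + (left : Int) * pvIntOf value)
  else total
termination_by n - left

def part_one_alt (data : List String) : Int :=
  let moves_to_make := data.countP (fun x => x ≠ ".")
  partOneLoopB data moves_to_make 0 (data.length - 1) 0

-- ===== PRECONDITION & SPEC =====
-- Pre_ excludes exactly the inputs where Python A raises ValueError: some block string that is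
-- neither "." nor int()-parsable (every non-dot element of data is read by int(), so this is exact).
def Pre_part_one (data : List String) : Prop :=
  ∀ s ∈ data, s = "." ∨ (PySem.Int.ofStr? s).isSome = true
instance (data : List String) : Decidable (Pre_part_one data) := by unfold Pre_part_one; infer_instance
def pvWitness_part_one : List String := ["2", ".", "3"]

def Spec_part_one (data : List String) (out : Int) : Prop := out = part_one_alt data
instance (data : List String) (out : Int) : Decidable (Spec_part_one data out) := by unfold Spec_part_one; infer_instance

-- ===== CLAIM (what is proved, stated in full; the proofs are below) =====
def Claim_equal_part_one : Prop := ∀ (data : List String), Dom_part_one data → Pre_part_one data → Spec_part_one data (part_one data)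

-- ===== LEMMAS AND PROOFS =====

-- a nonempty prefix of a list decomposed as prefix ++ last element
lemma pv_take_concat {α : Type} (l : List α) (m : Nat) (h1 : 1 ≤ m) (h2 : m ≤ l.length) :
    l.take m = l.take (m - 1) ++ [l[m - 1]'(by omega)] := by
  conv_lhs => rw [show m = (m - 1) + 1 by omega]
  rw [List.take_add_one, List.getElem?_eq_getElem (by omega)]
  rfl

-- what B's while-loop finds: the last element of the filtered prefix, and its dropLast is the
-- filtered content of data left of the final cursor position
lemma pv_skip_spec (data : List String) (r : Nat) (hr : r < data.length)
    (L : List String) (hL : (data.take (r + 1)).filter (fun x => x ≠ ".") = L) (hne : L ≠ []) :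
    pvSkipDots data r ≤ r ∧ data[pvSkipDots data r]? = L.getLast? ∧
      (data.take (pvSkipDots data r)).filter (fun x => x ≠ ".") = L.dropLast := by
  induction r generalizing L with
  | zero =>
    have hget : data[0]? = some (data[0]'hr) := List.getElem?_eq_getElem hr
    rw [List.take_add_one, hget] at hL
    by_cases hdot : data[0]'hr = "."
    · simp [hdot] at hL
      exact absurd hL hne
    · have hskip : pvSkipDots data 0 = 0 := by
        rw [pvSkipDots]
        simp [hget, hdot]
      simp only [List.take_zero] at hL ⊢
      simp [hdot] at hL
      rw [hskip, ← hL]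
      simp [hget]
  | succ r' ih =>
    have hget : data[r' + 1]? = some (data[r' + 1]'hr) := List.getElem?_eq_getElem hr
    rw [List.take_add_one, hget] at hL
    by_cases hdot : data[r' + 1]'hr = "."
    · have hskip : pvSkipDots data (r' + 1) = pvSkipDots data r' := by
        rw [pvSkipDots]
        simp [hget, hdot]
      have hL' : (data.take (r' + 1)).filter (fun x => x ≠ ".") = L := by
        simpa [hdot] using hL
      obtain ⟨h1, h2, h3⟩ := ih (by omega) L hL' hne
      exact ⟨by omega, by rw [hskip]; exact h2, by rw [hskip]; exact h3⟩
    · have hskip : pvSkipDots data (r' + 1) = r' + 1 := by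
        rw [pvSkipDots]
        simp [hget, hdot]
      have hL2 : (data.take (r' + 1)).filter (fun x => x ≠ ".") ++ [data[r' + 1]'hr] = L := by
        rw [← hL]
        simp [List.take_add_one, List.filter_append, hdot]
      refine ⟨by simp [hskip], ?_, ?_⟩
      · rw [hskip, hget, ← hL2, List.getLast?_concat]
      · rw [hskip, ← hL2, List.dropLast_concat]

-- the joint loop invariant: A's digits stack is a prefix of the filtered list, and B's right
-- cursor has that same prefix as the filtered content of data[0..right]
lemma pv_loop_eq (data : List String) (rest : List String) (i right : Nat) (total : Int)
    (hrest : rest = data.drop i)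
    (hin : i ≤ (data.filter (fun x => x ≠ ".")).length)
    (hinv : i < (data.filter (fun x => x ≠ ".")).length →
      right < data.length ∧
      (data.take (right + 1)).filter (fun x => x ≠ ".") =
        (data.filter (fun x => x ≠ ".")).take
          ((data.filter (fun x => x ≠ ".")).length - (data.take i).countP (fun x => x = "."))) :
    partOneLoopA rest i
        ((data.filter (fun x => x ≠ ".")).take
          ((data.filter (fun x => x ≠ ".")).length - (data.take i).countP (fun x => x = ".")))
        total (data.filter (fun x => x ≠ ".")).length
      = partOneLoopB data (data.filter (fun x => x ≠ ".")).length i right total := by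
  set nd := data.filter (fun x => x ≠ ".") with hnd
  set n := nd.length with hn
  induction rest generalizing i right total with
  | nil =>
    have hlen : data.length ≤ i := List.drop_eq_nil_iff.mp hrest.symm
    have hni : ¬ i < n := by
      have h2 : n ≤ data.length := by
        rw [hn, hnd]
        exact List.length_filter_le _ _
      omega
    rw [partOneLoopB, dif_neg hni]
    rfl
  | cons c rest' ih =>
    have hlen : i < data.length := by
      by_contra h
      rw [List.drop_eq_nil_iff.mpr (by omega)] at hrest
      exact List.cons_ne_nil _ _ hrest
    have hci : data[i]? = some c := by
      have h0 : (data.drop i)[0]? = some c := by rw [← hrest]; rfl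
      rwa [List.getElem?_drop, Nat.add_zero] at h0
    have hrest' : rest' = data.drop (i + 1) := by
      have : data.drop (i + 1) = (data.drop i).drop 1 := by rw [List.drop_drop]
      rw [this, ← hrest]
      rfl
    have hcval : data[i]'hlen = c := by
      have := List.getElem?_eq_getElem hlen
      rw [hci] at this
      exact (Option.some_inj.mp this).symm
    by_cases hi : i = n
    · rw [partOneLoopA, if_pos hi, partOneLoopB, dif_neg (by omega)]
    · have hilt : i < n := by omega
      obtain ⟨hrlt, hfilt⟩ := hinv hilt
      set k := (data.take i).countP (fun x => x = ".") with hk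
      have hkle : k ≤ i := by
        have h : k ≤ (data.take i).length := List.countP_le_length
        rw [List.length_take] at h
        omega
      have hklt : k < n := by omega
      have hksub : 1 ≤ n - k := by omega
      have hdots_succ : (data.take (i + 1)).countP (fun x => x = ".") =
          k + (if c = "." then 1 else 0) := by
        rw [List.take_add_one, hci, List.countP_append]
        by_cases hc2 : c = "." <;> simp [hc2, hk]
      rw [partOneLoopB, dif_pos hilt]
      simp only [hci, Option.getD_some]
      by_cases hc : c = "."
      · -- dot: pull from the right
        have hLne : nd.take (n - k) ≠ [] := by
          have : (nd.take (n - k)).length = n - k := by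
            rw [List.length_take]
            omega
          intro h
          rw [h] at this
          simp at this
          omega
        obtain ⟨hj1, hj2, hj3⟩ := pv_skip_spec data right hrlt _ hfilt hLne
        set j := pvSkipDots data right with hj
        have hconcat : nd.take (n - k) = nd.take (n - k - 1) ++ [nd[n - k - 1]'(by omega)] :=
          pv_take_concat nd (n - k) hksub (by omega)
        have hlast : (nd.take (n - k)).getLast? = some (nd[n - k - 1]'(by omega)) := by
          rw [hconcat, List.getLast?_concat]
        have hdrop : (nd.take (n - k)).dropLast = nd.take (n - k - 1) := by
          rw [hconcat, List.dropLast_concat]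
        have hpop : PySem.List.pop? (nd.take (n - k)) = some (nd[n - k - 1]'(by omega), nd.take (n - k - 1)) := by
          rw [hconcat]
          exact PySem.List.pop?_last _ _
        rw [partOneLoopA, if_neg hi, if_pos hc, hpop]
        simp only [if_pos hc]
        have hjv : (data[j]?).getD "." = nd[n - k - 1]'(by omega) := by
          rw [hj2, hlast]
          rfl
        rw [hjv]
        have harith : n - (k + (if c = "." then 1 else 0)) = n - k - 1 := by
          rw [if_pos hc]; omega
        have := ih (i + 1) (j - 1) (total + (i : Int) * pvIntOf (nd[n - k - 1]'(by omega)))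
          hrest' (by omega) ?_
        · rw [hdots_succ, harith] at this
          exact this
        · -- new invariant
          intro hi1
          rw [hdots_succ, harith]
          have hk1lt : k + 1 < n := by omega
          have hnd1ne : nd.take (n - k - 1) ≠ [] := by
            have : (nd.take (n - k - 1)).length = n - k - 1 := by
              rw [List.length_take]; omega
            intro h
            rw [h] at this
            simp at this
            omega
          have hjpos : 1 ≤ j := by
            rcases Nat.eq_zero_or_pos j with h0 | h
            · rw [h0] at hj3
              simp at hj3
              rw [hdrop] at hj3
              exact absurd hj3 hnd1ne
            · exact h
          constructor
          · omega
          · rw [show j - 1 + 1 = j by omega, hj3, hdrop]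
      · -- non-dot
        rw [partOneLoopA, if_neg hi, if_neg hc]
        simp only [if_neg hc]
        have harith : k + (if c = "." then 1 else 0) = k := by simp [hc]
        have := ih (i + 1) right (total + (i : Int) * pvIntOf c) hrest' (by omega) ?_
        · rw [hdots_succ, harith] at this
          exact this
        · intro _
          rw [hdots_succ, harith]
          exact ⟨hrlt, hfilt⟩

-- ===== VERDICT (by name: the statement is the Claim_ definition above) =====
theorem part_one_spec : Claim_equal_part_one := by
  intro data _ _
  unfold Spec_part_one part_one part_one_alt
  simp only [List.countP_eq_length_filter]
  have h0 : (data.take 0).countP (fun x => x = ".") = 0 := by simp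
  have hmain := pv_loop_eq data data 0 (data.length - 1) 0 (List.drop_zero).symm
    (Nat.zero_le _) ?_
  · simpa [h0, List.take_length] using hmain
  · intro h0n
    have hle : (data.filter (fun x => x ≠ ".")).length ≤ data.length :=
      List.length_filter_le _ _
    refine ⟨by omega, ?_⟩
    rw [show data.length - 1 + 1 = data.length by omega, List.take_length, h0,
      Nat.sub_zero, List.take_length]
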